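-- pv_equiv track=rewrite | github.com/TheDurableDane/from-tard-to-pro-at-2048 | src/game.py | pair_pieces
-- ===== SOURCE A (Python) =====
-- def pair_pieces(lst):
--     """
--      pairs pieces in a list of 4 elements (row or column in board)
--      returns new list with all zeros displaced to the right
--      e.g. [2 0 2 4] -> [4 4 0 0]
--     """
--     pieces = [x for x in lst if x > 0]
--     pieces = pieces + [0]  # so that last piece can always be paired
--     m = len(pieces)
--     new_lst = []
--     i = 0
--     while i < m-1:
--         first, second = pieces[i], pieces[i+1]
--         if first == second:
--             new_lst.append(first + second)
--             del pieces[i:i+2]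
--             m -= 2
--         else:
--             new_lst.append(first)
--             i += 1
--     new_lst = new_lst + [0]*(4-len(new_lst))
--     return new_lst
-- ===== SOURCE B (Python) =====
-- def pair_pieces(lst):
--     """
--      pairs pieces in a list of 4 elements (row or column in board)
--      returns new list with all zeros displaced to the right
--      e.g. [2 0 2 4] -> [4 4 0 0]
--     """
--     # run-length encode the positive pieces, then emit each run directly
--     runs = []  # list of [value, count]
--     for x in lst:
--         if x <= 0:
--             continue
--         if runs and runs[-1][0] == x:
--             runs[-1][1] += 1
--         else:
--             runs.append([x, 1])
--     new_lst = []
--     for v, c in runs: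
--         new_lst.extend([2 * v] * (c // 2))
--         if c % 2:
--             new_lst.append(v)
--     return new_lst + [0] * (4 - len(new_lst))
-- ===== Notes on version B (the rewrite author's own statement) =====
-- stated objective: alternative
-- what changed: Replaces A's in-place delete/reindex scan over a sentinel-padded list with a run-length encoding of the positive pieces followed by a direct per-run emission (floor(c/2) doubled values plus an odd leftover).
import Mathlib
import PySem

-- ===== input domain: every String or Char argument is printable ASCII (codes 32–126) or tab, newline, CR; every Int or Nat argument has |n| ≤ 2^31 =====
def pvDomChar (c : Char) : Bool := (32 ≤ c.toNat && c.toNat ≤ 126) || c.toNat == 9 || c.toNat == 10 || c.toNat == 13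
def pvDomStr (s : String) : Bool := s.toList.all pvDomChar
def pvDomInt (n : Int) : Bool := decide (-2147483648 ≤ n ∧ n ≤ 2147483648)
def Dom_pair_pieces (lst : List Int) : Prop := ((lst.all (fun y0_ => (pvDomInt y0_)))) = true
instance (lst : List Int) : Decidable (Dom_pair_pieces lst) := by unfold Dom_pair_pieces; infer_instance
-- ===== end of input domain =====

-- B replaces A's in-place delete/reindex scan with run-length encoding of the
-- positive pieces followed by direct per-run emission; return values are equal.

-- ===== PORT A =====
-- A's while loop: state is (pieces, i, new_lst); `m` always equals pieces.length
-- (it is decremented exactly when two elements are deleted), so the guard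
-- `i < m-1` is ported as `i + 1 < pieces.length`.  `del pieces[i:i+2]` is
-- `pieces.take i ++ pieces.drop (i+2)` (i+2 ≤ length here, so this is exact).
def pairLoopA (pieces : List Int) (i : Nat) (newLst : List Int) : List Int :=
  if h : i + 1 < pieces.length then
    have h0 : i < pieces.length := by omega
    let first := pieces[i]
    let second := pieces[i+1]
    if first = second then
      pairLoopA (pieces.take i ++ pieces.drop (i+2)) i (newLst ++ [first + second])
    else
      pairLoopA pieces (i+1) (newLst ++ [first])
  else newLst
termination_by pieces.length - i
decreasing_by
  · simp only [List.length_append, List.length_take, List.length_drop]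
    omega
  · omega

def pair_pieces (lst : List Int) : List Int :=
  let pieces := (lst.filter (fun x => 0 < x)) ++ [0]
  let newLst := pairLoopA pieces 0 []
  newLst ++ List.replicate (4 - newLst.length) 0

-- ===== PORT B =====
-- B keeps `runs` as a Python list whose LAST run is mutated; ported as a foldl
-- over a reversed run stack (head = most recent run), reversed at the end.
def stepRun (runs : List (Int × Nat)) (x : Int) : List (Int × Nat) :=
  if x ≤ 0 then runs
  else
    match runs with
    | (v, c) :: rest => if v = x then (v, c+1) :: rest else (x, 1) :: (v, c) :: rest
    | [] => [(x, 1)]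

-- new_lst.extend([2*v]*(c//2)); if c % 2: new_lst.append(v)
def emitRun (v : Int) (c : Nat) : List Int :=
  List.replicate (c / 2) (2 * v) ++ (if c % 2 = 1 then [v] else [])

def pair_pieces_alt (lst : List Int) : List Int :=
  let runs := (lst.foldl stepRun []).reverse
  let newLst := runs.flatMap (fun r => emitRun r.1 r.2)
  newLst ++ List.replicate (4 - newLst.length) 0

-- ===== PRECONDITION & SPEC =====
def Spec_pair_pieces (lst : List Int) (out : List Int) : Prop := out = pair_pieces_alt lst
instance (lst : List Int) (out : List Int) : Decidable (Spec_pair_pieces lst out) := by unfold Spec_pair_pieces; infer_instance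

-- ===== CLAIM (what is proved, stated in full; the proofs are below) =====
def Claim_equal_pair_pieces : Prop := ∀ (lst : List Int), Dom_pair_pieces lst → Spec_pair_pieces lst (pair_pieces lst)

-- ===== LEMMAS AND PROOFS =====

-- Reference function: pair adjacent equal elements left to right, one pass.
def pairRec : List Int → List Int
  | [] => []
  | [x] => [x]
  | x :: y :: rest => if x = y then (x + y) :: pairRec rest else x :: pairRec (y :: rest)

-- A's loop, re-expressed structurally on the not-yet-passed suffix.
def loopAux : List Int → List Int → List Int
  | x :: y :: rest, acc => if x = y then loopAux rest (acc ++ [x + y]) else loopAux (y :: rest) (acc ++ [x])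
  | _, acc => acc

theorem pairLoopA_eq_loopAux (rest pre acc : List Int) :
    pairLoopA (pre ++ rest) pre.length acc = loopAux rest acc := by
  induction rest, acc using loopAux.induct generalizing pre with
  | case1 y r acc ih =>
    rw [pairLoopA]
    have hl : pre.length + 1 < (pre ++ y :: y :: r).length := by
      simp [List.length_append]
    rw [dif_pos hl]
    have hx : (pre ++ y :: y :: r)[pre.length]'(by omega) = y := by
      simp [List.getElem_append_right]
    have hy : (pre ++ y :: y :: r)[pre.length + 1]'hl = y := by
      have h1 : pre.length + 1 - pre.length = 1 := by omega
      simp [List.getElem_append_right, h1]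
    simp only [hx, hy, if_true]
    have ht : (pre ++ y :: y :: r).take pre.length = pre := by
      simp
    have hd : (pre ++ y :: y :: r).drop (pre.length + 2) = r := by
      simpa using List.drop_length_add_append (l₁ := pre) (l₂ := y :: y :: r) (i := 2)
    rw [ht, hd, ih pre, loopAux, if_pos rfl]
  | case2 x y r acc hxy ih =>
    rw [pairLoopA]
    have hl : pre.length + 1 < (pre ++ x :: y :: r).length := by
      simp [List.length_append]
    rw [dif_pos hl]
    have hx : (pre ++ x :: y :: r)[pre.length]'(by omega) = x := by
      simp [List.getElem_append_right]
    have hy : (pre ++ x :: y :: r)[pre.length + 1]'hl = y := by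
      have h1 : pre.length + 1 - pre.length = 1 := by omega
      simp [List.getElem_append_right, h1]
    simp only [hx, hy, if_neg hxy]
    have h2 : pre.length + 1 = (pre ++ [x]).length := by simp
    rw [show pre ++ x :: y :: r = (pre ++ [x]) ++ y :: r by simp, h2,
      ih (pre ++ [x]), loopAux, if_neg hxy]
  | case3 t acc h =>
    rw [pairLoopA]
    have hng : ¬ pre.length + 1 < (pre ++ t).length := by
      match t, h with
      | [], _ => simp
      | [x], _ => simp
      | x :: y :: r, h => exact absurd rfl (h x y r)
    rw [dif_neg hng]
    match t, h with
    | [], _ => rfl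
    | [x], _ => rfl
    | x :: y :: r, h => exact absurd rfl (h x y r)

theorem loopAux_sentinel (P : List Int) (acc : List Int) (hP : ∀ x ∈ P, 0 < x) :
    loopAux (P ++ [0]) acc = acc ++ pairRec P := by
  induction P using pairRec.induct generalizing acc with
  | case1 => simp [loopAux, pairRec]
  | case2 x =>
    have hx : ¬ x = (0 : Int) := by have := hP x (by simp); omega
    simp [loopAux, pairRec, hx]
  | case3 y rest ih =>
    simp only [List.cons_append, loopAux, if_true]
    rw [ih (acc ++ [y + y]) (fun z hz => hP z (by simp [hz])), pairRec, if_pos rfl]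
    simp
  | case4 x y rest hxy ih =>
    simp only [List.cons_append, loopAux, if_neg hxy]
    rw [show y :: (rest ++ [0]) = (y :: rest) ++ [0] by simp,
      ih (acc ++ [x]) (fun z hz => hP z (List.mem_cons_of_mem x hz)), pairRec, if_neg hxy]
    simp

-- B side: fold with the positivity guard = fold without it over the filtered list.
def stepRun' (runs : List (Int × Nat)) (x : Int) : List (Int × Nat) :=
  match runs with
  | (v, c) :: rest => if v = x then (v, c+1) :: rest else (x, 1) :: (v, c) :: rest
  | [] => [(x, 1)]

theorem foldl_stepRun_filter (lst : List Int) (acc : List (Int × Nat)) :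
    lst.foldl stepRun acc = (lst.filter (fun x => 0 < x)).foldl stepRun' acc := by
  induction lst generalizing acc with
  | nil => rfl
  | cons x xs ih =>
    by_cases hx : (0 : Int) < x
    · have h1 : ¬ x ≤ 0 := by omega
      simp [List.foldl, stepRun, h1, List.filter, hx, ih, stepRun']
    · have h1 : x ≤ 0 := by omega
      simp [List.foldl, stepRun, h1, List.filter, hx, ih]

theorem emit_succ2 (v : Int) (c : Nat) :
    emitRun v (c + 2) = (2 * v) :: emitRun v c := by
  simp [emitRun, Nat.add_mod_right, show (c + 2) / 2 = c / 2 + 1 by omega,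
    List.replicate_succ]

theorem pairRec_replicate (c : Nat) (v : Int) (Q : List Int)
    (hQ : ∀ y, Q.head? = some y → y ≠ v) :
    pairRec (List.replicate c v ++ Q) = emitRun v c ++ pairRec Q := by
  induction c using Nat.strong_induction_on with
  | _ c ih =>
    match c with
    | 0 => simp [emitRun]
    | 1 =>
      match Q with
      | [] => simp [pairRec, emitRun]
      | y :: ys =>
        have hy : ¬ v = y := fun h => hQ y rfl h.symm
        simp [pairRec, hy, emitRun]
    | c + 2 =>
      rw [show List.replicate (c + 2) v = v :: v :: List.replicate c v by
        simp [List.replicate_succ], emit_succ2]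
      have : pairRec (v :: v :: (List.replicate c v ++ Q)) =
          (v + v) :: pairRec (List.replicate c v ++ Q) := by
        simp [pairRec]
      rw [List.cons_append, List.cons_append, this, ih c (by omega)]
      simp [two_mul]

theorem foldl_stepRun'_decode (P : List Int) (v : Int) (c : Nat) (R : List (Int × Nat))
    (hc : 1 ≤ c) :
    ((P.foldl stepRun' ((v, c) :: R)).reverse.flatMap (fun r => emitRun r.1 r.2)) =
      (R.reverse.flatMap (fun r => emitRun r.1 r.2)) ++ pairRec (List.replicate c v ++ P) := by
  induction P generalizing v c R with
  | nil =>
    simp only [List.foldl, List.reverse_cons, List.flatMap_append, List.flatMap_cons,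
      List.flatMap_nil, List.append_nil]
    congr 1
    simpa [pairRec] using (pairRec_replicate c v [] (by simp)).symm
  | cons x xs ih =>
    simp only [List.foldl, stepRun']
    by_cases hvx : v = x
    · rw [if_pos hvx, ih v (c+1) R (by omega)]
      congr 2
      rw [show List.replicate (c+1) v = List.replicate c v ++ [v] by
        simp [List.replicate_succ'], hvx]
      simp
    · rw [if_neg hvx, ih x 1 ((v, c) :: R) (by omega)]
      simp only [List.reverse_cons, List.flatMap_append, List.flatMap_cons,
        List.flatMap_nil, List.append_nil, List.append_assoc]
      congr 1
      rw [pairRec_replicate c v (x :: xs) (by intro y hy h; simp at hy; subst hy; exact hvx h.symm)]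
      simp

theorem decode_eq_pairRec (P : List Int) :
    ((P.foldl stepRun' []).reverse.flatMap (fun r => emitRun r.1 r.2)) = pairRec P := by
  match P with
  | [] => rfl
  | x :: xs =>
    simp only [List.foldl, stepRun']
    rw [foldl_stepRun'_decode xs x 1 [] (by omega)]
    simp

-- ===== VERDICT (by name: the statement is the Claim_ definition above) =====
theorem pair_pieces_spec : Claim_equal_pair_pieces := by
  intro lst _
  unfold Spec_pair_pieces
  have hA : pairLoopA ((lst.filter (fun x => 0 < x)) ++ [0]) 0 [] =
      pairRec (lst.filter (fun x => 0 < x)) := by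
    have := pairLoopA_eq_loopAux ((lst.filter (fun x => 0 < x)) ++ [0]) [] []
    simp only [List.nil_append, List.length_nil] at this
    rw [this, loopAux_sentinel _ _ (by intro x hx; simpa using (List.of_mem_filter hx))]
    simp
  simp only [pair_pieces, pair_pieces_alt, hA, foldl_stepRun_filter, decode_eq_pairRec]
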